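-- pv_equiv track=rewrite | github.com/willozwi/AppCaccia | Gestionale Caccia Opus 4.6/pages/import_fogli.py | cerca_cacciatore_fuzzy
-- ===== SOURCE A (Python) =====
-- def cerca_cacciatore_fuzzy(cognome: str, nome: str, cacciatori_esistenti: list, data_nascita=None) -> dict:
--     """Cerca un cacciatore con matching fuzzy su cognome+nome"""
--     if not cognome or not nome:
--         return None
--
--     cognome_upper = cognome.upper().strip()
--     nome_title = nome.title().strip()
--
--     # Match esatto
--     for c in cacciatori_esistenti:
--         if c.get('cognome', '').upper() == cognome_upper and c.get('nome', '').title() == nome_title: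
--             if data_nascita and c.get('data_nascita'):
--                 if str(c.get('data_nascita')) == str(data_nascita):
--                     return c
--             else:
--                 return c
--
--     # Match fuzzy (cognome esatto, nome abbreviato)
--     for c in cacciatori_esistenti:
--         cognome_db = c.get('cognome', '').upper()
--         nome_db = c.get('nome', '').title()
--
--         if cognome_db == cognome_upper:
--             if nome_title in nome_db or nome_db in nome_title:
--                 return c
--
--     return None
-- ===== SOURCE B (Python) =====
-- def cerca_cacciatore_fuzzy(cognome: str, nome: str, cacciatori_esistenti: list, data_nascita=None) -> dict:
--     """Single pass: return the first exact match immediately; remember the first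
--     fuzzy match as a fallback and return it (or None) after the loop."""
--     if not cognome or not nome:
--         return None
--
--     cognome_upper = cognome.upper().strip()
--     nome_title = nome.title().strip()
--
--     fallback = None
--     for c in cacciatori_esistenti:
--         cognome_db = c.get('cognome', '').upper()
--         nome_db = c.get('nome', '').title()
--         if cognome_db == cognome_upper and nome_db == nome_title:
--             dn = c.get('data_nascita')
--             if not (data_nascita and dn) or str(dn) == str(data_nascita):
--                 return c
--         if fallback is None and cognome_db == cognome_upper and (nome_title in nome_db or nome_db in nome_title):
--             fallback = c
--     return fallback
-- ===== Notes on version B (the rewrite author's own statement) =====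
-- stated objective: alternative
-- what changed: Replaced A's two sequential scans (exact pass, then fuzzy pass) by a single scan that returns the first exact match immediately and keeps the first fuzzy match as a fallback returned after the loop.
import Mathlib
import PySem

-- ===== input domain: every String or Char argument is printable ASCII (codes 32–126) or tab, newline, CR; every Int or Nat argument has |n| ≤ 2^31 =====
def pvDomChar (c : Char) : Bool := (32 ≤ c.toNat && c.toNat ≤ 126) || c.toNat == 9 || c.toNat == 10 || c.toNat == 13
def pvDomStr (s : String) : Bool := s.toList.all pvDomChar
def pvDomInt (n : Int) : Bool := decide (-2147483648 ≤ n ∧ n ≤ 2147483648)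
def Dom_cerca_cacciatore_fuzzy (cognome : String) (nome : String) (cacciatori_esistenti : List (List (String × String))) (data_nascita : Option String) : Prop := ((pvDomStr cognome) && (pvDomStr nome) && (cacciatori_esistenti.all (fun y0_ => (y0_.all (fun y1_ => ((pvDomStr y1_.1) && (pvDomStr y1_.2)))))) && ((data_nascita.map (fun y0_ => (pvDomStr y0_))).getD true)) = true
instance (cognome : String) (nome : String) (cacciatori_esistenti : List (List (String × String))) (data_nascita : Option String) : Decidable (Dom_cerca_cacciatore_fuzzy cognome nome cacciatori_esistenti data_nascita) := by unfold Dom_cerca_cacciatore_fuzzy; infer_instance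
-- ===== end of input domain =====

-- B (alternative): one scan over cacciatori_esistenti — return the first exact match immediately, keep the first fuzzy match as a fallback — instead of A's two sequential passes; same O(n) cost.


-- ===== PORT A =====
-- shared string/dict helpers for both ports (library-level Python operations)
-- Python str.title(): exact on the ASCII domain (cased == isalpha there)
def pvTitleAux : List Char → Bool → List Char
  | [], _ => []
  | c :: rest, prevAlpha =>
    (if prevAlpha then PySem.Chars.lowerChar c else PySem.Chars.upperChar c) ::
      pvTitleAux rest (PySem.Chars.isalpha c)

def pvTitle (s : String) : String := String.mk (pvTitleAux s.toList false)

-- c.get(k) / c.get(k, dflt) on the association-list dict (first match)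
def pvDget? (c : List (String × String)) (k : String) : Option String :=
  (c.find? (fun p => p.1 == k)).map (·.2)

def pvDget (c : List (String × String)) (k dflt : String) : String :=
  (pvDget? c k).getD dflt

-- Python truthiness of an optional string
def pvTruthy : Option String → Bool
  | some s => s != ""
  | none => false

-- A's first loop: exact match (with the nested date check, literally)
def pvLoopExact (cu nt : String) (dn : Option String) :
    List (List (String × String)) → Option (List (String × String))
  | [] => none
  | c :: rest =>
    if PySem.Str.upper (pvDget c "cognome" "") == cu && pvTitle (pvDget c "nome" "") == nt then
      if pvTruthy dn && pvTruthy (pvDget? c "data_nascita") then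
        if (pvDget? c "data_nascita").getD "" == dn.getD "" then some c
        else pvLoopExact cu nt dn rest
      else some c
    else pvLoopExact cu nt dn rest

-- A's second loop: fuzzy match
def pvLoopFuzzy (cu nt : String) :
    List (List (String × String)) → Option (List (String × String))
  | [] => none
  | c :: rest =>
    let cognome_db := PySem.Str.upper (pvDget c "cognome" "")
    let nome_db := pvTitle (pvDget c "nome" "")
    if cognome_db == cu then
      if PySem.Str.isIn nt nome_db || PySem.Str.isIn nome_db nt then some c
      else pvLoopFuzzy cu nt rest
    else pvLoopFuzzy cu nt rest

def cerca_cacciatore_fuzzy (cognome : String) (nome : String) (cacciatori_esistenti : List (List (String × String))) (data_nascita : Option String) : Option (List (String × String)) :=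
  if cognome == "" || nome == "" then none
  else
    let cognome_upper := PySem.Str.strip (PySem.Str.upper cognome)
    let nome_title := PySem.Str.strip (pvTitle nome)
    match pvLoopExact cognome_upper nome_title data_nascita cacciatori_esistenti with
    | some c => some c
    | none => pvLoopFuzzy cognome_upper nome_title cacciatori_esistenti

-- ===== PORT B =====
-- B combines the exact condition (incl. the date logic) into one boolean
def pvMatchExact (cu nt : String) (dn : Option String) (c : List (String × String)) : Bool :=
  PySem.Str.upper (pvDget c "cognome" "") == cu && pvTitle (pvDget c "nome" "") == nt &&
    (!(pvTruthy dn && pvTruthy (pvDget? c "data_nascita")) ||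
      (pvDget? c "data_nascita").getD "" == dn.getD "")

def pvMatchFuzzy (cu nt : String) (c : List (String × String)) : Bool :=
  PySem.Str.upper (pvDget c "cognome" "") == cu &&
    (PySem.Str.isIn nt (pvTitle (pvDget c "nome" "")) ||
     PySem.Str.isIn (pvTitle (pvDget c "nome" "")) nt)

-- B's single scan with a fuzzy fallback accumulator
def pvScan (cu nt : String) (dn : Option String)
    (fallback : Option (List (String × String))) :
    List (List (String × String)) → Option (List (String × String))
  | [] => fallback
  | c :: rest =>
    if pvMatchExact cu nt dn c then some c
    else pvScan cu nt dn
      (if fallback.isNone && pvMatchFuzzy cu nt c then some c else fallback) rest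

def cerca_cacciatore_fuzzy_alt (cognome : String) (nome : String) (cacciatori_esistenti : List (List (String × String))) (data_nascita : Option String) : Option (List (String × String)) :=
  if cognome == "" || nome == "" then none
  else
    let cognome_upper := PySem.Str.strip (PySem.Str.upper cognome)
    let nome_title := PySem.Str.strip (pvTitle nome)
    pvScan cognome_upper nome_title data_nascita none cacciatori_esistenti

-- ===== PRECONDITION & SPEC =====
def Spec_cerca_cacciatore_fuzzy (cognome : String) (nome : String) (cacciatori_esistenti : List (List (String × String))) (data_nascita : Option String) (out : Option (List (String × String))) : Prop := out = cerca_cacciatore_fuzzy_alt cognome nome cacciatori_esistenti data_nascita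
instance (cognome : String) (nome : String) (cacciatori_esistenti : List (List (String × String))) (data_nascita : Option String) (out : Option (List (String × String))) : Decidable (Spec_cerca_cacciatore_fuzzy cognome nome cacciatori_esistenti data_nascita out) := by unfold Spec_cerca_cacciatore_fuzzy; infer_instance

-- ===== CLAIM (what is proved, stated in full; the proofs are below) =====
def Claim_equal_cerca_cacciatore_fuzzy : Prop := ∀ (cognome : String) (nome : String) (cacciatori_esistenti : List (List (String × String))) (data_nascita : Option String), Dom_cerca_cacciatore_fuzzy cognome nome cacciatori_esistenti data_nascita → Spec_cerca_cacciatore_fuzzy cognome nome cacciatori_esistenti data_nascita (cerca_cacciatore_fuzzy cognome nome cacciatori_esistenti data_nascita)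

-- ===== LEMMAS AND PROOFS =====
theorem pvLoopExact_cons (cu nt : String) (dn : Option String) (c : List (String × String))
    (rest : List (List (String × String))) :
    pvLoopExact cu nt dn (c :: rest) =
      if pvMatchExact cu nt dn c then some c else pvLoopExact cu nt dn rest := by
  by_cases h1 : (PySem.Str.upper (pvDget c "cognome" "") == cu && pvTitle (pvDget c "nome" "") == nt) = true <;>
  by_cases h2 : (pvTruthy dn && pvTruthy (pvDget? c "data_nascita")) = true <;>
  by_cases h3 : ((pvDget? c "data_nascita").getD "" == dn.getD "") = true <;>
  simp [pvLoopExact, pvMatchExact, h1, h2, h3]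

theorem pvLoopFuzzy_cons (cu nt : String) (c : List (String × String))
    (rest : List (List (String × String))) :
    pvLoopFuzzy cu nt (c :: rest) =
      if pvMatchFuzzy cu nt c then some c else pvLoopFuzzy cu nt rest := by
  by_cases h1 : (PySem.Str.upper (pvDget c "cognome" "") == cu) = true <;>
  by_cases h2 : (PySem.Str.isIn nt (pvTitle (pvDget c "nome" "")) ||
      PySem.Str.isIn (pvTitle (pvDget c "nome" "")) nt) = true <;>
  simp [pvLoopFuzzy, pvMatchFuzzy, h1, h2]

theorem pvScan_eq (cu nt : String) (dn : Option String)
    (l : List (List (String × String))) :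
    ∀ fallback, pvScan cu nt dn fallback l =
      match pvLoopExact cu nt dn l with
      | some c => some c
      | none =>
        match fallback with
        | some b => some b
        | none => pvLoopFuzzy cu nt l := by
  induction l with
  | nil => intro fallback; cases fallback <;> simp [pvScan, pvLoopExact, pvLoopFuzzy]
  | cons c rest ih =>
    intro fallback
    rw [pvLoopExact_cons, pvLoopFuzzy_cons]
    by_cases hE : pvMatchExact cu nt dn c = true
    · simp [pvScan, hE]
    · simp only [pvScan, hE, if_neg, Bool.false_eq_true, not_false_eq_true]
      rw [ih]
      cases hL : pvLoopExact cu nt dn rest <;> cases fallback <;>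
        by_cases hF : pvMatchFuzzy cu nt c = true <;> simp [hF]

-- ===== VERDICT (by name: the statement is the Claim_ definition above) =====
theorem cerca_cacciatore_fuzzy_spec : Claim_equal_cerca_cacciatore_fuzzy := by
  intro cognome nome l dn _
  unfold Spec_cerca_cacciatore_fuzzy cerca_cacciatore_fuzzy cerca_cacciatore_fuzzy_alt
  by_cases hg : (cognome == "" || nome == "") = true
  · simp [hg]
  · simp only [hg, Bool.false_eq_true, not_false_eq_true, if_neg]
    rw [pvScan_eq]
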